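-- pv_equiv track=rewrite | github.com/Guillaume-Fgt/Advent_Of_Code | Day_01_Trebuchet/part_2.py | pos_nums
-- ===== SOURCE A (Python) =====
-- from collections import defaultdict
--
-- TO_DIGIT = {
--     "one": 1,
--     "two": 2,
--     "three": 3,
--     "four": 4,
--     "five": 5,
--     "six": 6,
--     "seven": 7,
--     "eight": 8,
--     "nine": 9,
--     "1": 1,
--     "2": 2,
--     "3": 3,
--     "4": 4,
--     "5": 5,
--     "6": 6,
--     "7": 7,
--     "8": 8,
--     "9": 9,
-- }
--
-- def findall(number: str, line: str) -> list[tuple[int, int]]: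
--     result = []
--     i = line.find(number)
--     while i != -1:
--         result.append((TO_DIGIT[number], i))
--         i = line.find(number, i + 1)
--     return result
--
-- def pos_nums(line: str) -> defaultdict[str, list[str, int]]:
--     result = defaultdict(list)
--     for number in TO_DIGIT:
--         find_all = findall(number, line)
--         if find_all:
--             for x in find_all:
--                 result["pos"].append(x)
--     for element in result.values():
--         element.sort(key=lambda x: x[1])
--     return result
-- ===== SOURCE B (Python) =====
-- from collections import defaultdict
--
-- TO_DIGIT = {
--     "one": 1,
--     "two": 2,
--     "three": 3,
--     "four": 4,
--     "five": 5,
--     "six": 6,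
--     "seven": 7,
--     "eight": 8,
--     "nine": 9,
--     "1": 1,
--     "2": 2,
--     "3": 3,
--     "4": 4,
--     "5": 5,
--     "6": 6,
--     "7": 7,
--     "8": 8,
--     "9": 9,
-- }
--
-- def pos_nums(line: str) -> defaultdict[str, list]:
--     # One left-to-right pass over the positions of the line: at each index i,
--     # test each pattern with startswith.  Since no pattern is a prefix of
--     # another, at most one matches per index, so the hits come out already
--     # sorted by position and no final sort is needed.
--     hits = [
--         (value, i)
--         for i in range(len(line))
--         for key, value in TO_DIGIT.items()
--         if line.startswith(key, i)
--     ]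
--     result = defaultdict(list)
--     if hits:
--         result["pos"] = hits
--     return result
-- ===== Notes on version B (the rewrite author's own statement) =====
-- stated objective: alternative
-- what changed: A runs str.find repeatedly for each of the 18 patterns and then sorts the collected (digit, index) pairs by index; B makes one left-to-right pass over the positions of the line, testing each pattern with startswith at that position, so the hits are produced already ordered by position and no sort is needed.
import Mathlib
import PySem

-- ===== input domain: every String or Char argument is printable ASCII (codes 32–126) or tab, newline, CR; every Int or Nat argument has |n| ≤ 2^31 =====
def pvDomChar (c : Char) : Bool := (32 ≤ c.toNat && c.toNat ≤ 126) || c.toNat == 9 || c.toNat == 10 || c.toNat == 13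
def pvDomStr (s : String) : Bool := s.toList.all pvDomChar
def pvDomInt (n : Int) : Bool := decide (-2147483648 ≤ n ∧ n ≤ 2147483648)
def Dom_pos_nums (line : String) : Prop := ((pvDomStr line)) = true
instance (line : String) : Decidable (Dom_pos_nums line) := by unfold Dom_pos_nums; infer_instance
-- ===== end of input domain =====

-- B replaces A's per-pattern find-loops plus final sort by a single left-to-right scan of the
-- positions testing each pattern with startswith, so the hits appear already sorted by position.


-- the TO_DIGIT dict, in Python's insertion order (shared constant of both programs)
def TO_DIGIT : List (String × Int) :=
  [("one", 1), ("two", 2), ("three", 3), ("four", 4), ("five", 5), ("six", 6),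
   ("seven", 7), ("eight", 8), ("nine", 9),
   ("1", 1), ("2", 2), ("3", 3), ("4", 4), ("5", 5), ("6", 6), ("7", 7), ("8", 8), ("9", 9)]

-- ===== PORT A =====
-- the 'while i != -1' loop of findall; fuel = len(line)+2 suffices: the found index strictly
-- increases at each step and stays in [0, len(line)], so at most len+1 appends happen.
def findallLoop (d : Int) (number : String) (line : String) : Nat → Int → List (Int × Int)
  | 0, _ => []
  | fuel + 1, i =>
      if i = -1 then []
      else (d, i) :: findallLoop d number line fuel (PySem.Str.findFrom line number (i + 1) none)

-- findall(number, line); TO_DIGIT[number] is passed in as d by the caller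
def findall (number : String) (d : Int) (line : String) : List (Int × Int) :=
  findallLoop d number line (line.toList.length + 2) (PySem.Str.find line number)

def pos_nums (line : String) : List (String × List (Int × Int)) :=
  let result : PySem.Dict String (List (Int × Int)) :=
    TO_DIGIT.foldl (fun acc kv =>
      let find_all := findall kv.1 kv.2 line
      if find_all ≠ [] then
        -- result["pos"].append(x) on a defaultdict(list)
        find_all.foldl (fun a x => PySem.Dict.insert a "pos" (PySem.Dict.getD a "pos" [] ++ [x])) acc
      else acc) PySem.Dict.empty
  -- for element in result.values(): element.sort(key=lambda x: x[1])
  result.items.map (fun kv => (kv.1, PySem.List.sorted kv.2 (fun x => x.2) false))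

-- ===== PORT B =====
def pos_nums_alt (line : String) : List (String × List (Int × Int)) :=
  let cs := line.toList
  -- the comprehension: one pass over the positions, inner pass over the patterns;
  -- line.startswith(key, i) is exact as startswith on cs.drop i since 0 ≤ i ≤ len(line)
  let hits := (List.range cs.length).flatMap (fun i =>
    TO_DIGIT.filterMap (fun kv =>
      if PySem.Chars.startswith (cs.drop i) kv.1.toList then some (kv.2, (i : Int)) else none))
  if hits = [] then [] else [("pos", hits)]

-- ===== PRECONDITION & SPEC =====
def Spec_pos_nums (line : String) (out : List (String × List (Int × Int))) : Prop := out = pos_nums_alt line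
instance (line : String) (out : List (String × List (Int × Int))) : Decidable (Spec_pos_nums line out) := by unfold Spec_pos_nums; infer_instance

-- ===== CLAIM (what is proved, stated in full; the proofs are below) =====
def Claim_equal_pos_nums : Prop := ∀ (line : String), Dom_pos_nums line → Spec_pos_nums line (pos_nums line)

-- ===== LEMMAS AND PROOFS =====

-- occurrence positions of `num` in `cs` at indices ≥ j (ascending)
def occFrom (num cs : List Char) (j : Nat) : List Nat :=
  (List.range' j (cs.length - j)).filter (fun p => decide (num <+: cs.drop p))

lemma prefix_drop_infix_drop {num cs : List Char} {j p : Nat} (hj : j ≤ p)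
    (h : num <+: cs.drop p) : num <:+: cs.drop j := by
  have : cs.drop p = (cs.drop j).drop (p - j) := by rw [List.drop_drop]; congr 1; omega
  exact h.isInfix.trans (by rw [this]; exact (List.drop_suffix _ _).isInfix)

lemma occFrom_nil {num cs : List Char} {j : Nat} (h : ¬ num <:+: cs.drop j) :
    occFrom num cs j = [] := by
  unfold occFrom
  rw [List.filter_eq_nil_iff]
  intro p hp hpref
  exact h (prefix_drop_infix_drop (List.mem_range'_1.mp hp).1 (of_decide_eq_true hpref))

lemma occFrom_cons {num cs : List Char} {j p0 : Nat} (hj : j ≤ p0) (hlen : p0 < cs.length)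
    (hpref : num <+: cs.drop p0) (hmin : ∀ i, j ≤ i → i < p0 → ¬ num <+: cs.drop i) :
    occFrom num cs j = p0 :: occFrom num cs (p0 + 1) := by
  unfold occFrom
  have h1 : List.range' j (cs.length - j) = List.range' j (p0 - j) ++ List.range' p0 (cs.length - p0) := by
    have := List.range'_append_1 (s := j) (m := p0 - j) (n := cs.length - p0)
    rw [show j + (p0 - j) = p0 by omega, show p0 - j + (cs.length - p0) = cs.length - j by omega] at this
    exact this.symm
  have h2 : cs.length - p0 = (cs.length - (p0 + 1)) + 1 := by omega
  rw [h1, List.filter_append, h2, List.range'_succ]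
  have h3 : (List.range' j (p0 - j)).filter (fun p => decide (num <+: cs.drop p)) = [] := by
    rw [List.filter_eq_nil_iff]
    intro p hp hc
    have := List.mem_range'_1.mp hp
    exact hmin p this.1 (by omega) (of_decide_eq_true hc)
  rw [h3, List.nil_append, List.filter_cons, if_pos (decide_eq_true hpref)]

lemma findallLoop_eq (num line : String) (hnum : num.toList ≠ []) (d : Int)
    (fuel : Nat) : ∀ (j : Nat), j ≤ line.toList.length → line.toList.length + 1 - j ≤ fuel →
    findallLoop d num line fuel (PySem.Chars.findFrom line.toList num.toList (j : Int) none)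
      = (occFrom num.toList line.toList j).map (fun p : Nat => (d, (p : Int))) := by
  induction fuel with
  | zero => intro j hj hfuel; omega
  | succ fuel ih =>
    intro j hj hfuel
    by_cases hr : PySem.Chars.findFrom line.toList num.toList (j : Int) none = -1
    · rw [findallLoop, if_pos hr]
      rw [occFrom_nil ((PySem.Chars.findFrom_natCast_eq_neg_one_iff line.toList num.toList j hj).mp hr)]
      rfl
    · obtain ⟨hle, hpref, hmin⟩ := PySem.Chars.findFrom_natCast_spec line.toList num.toList j hj hr
      set r := PySem.Chars.findFrom line.toList num.toList (j : Int) none with hrdef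
      have hr0 : 0 ≤ r := le_trans (by positivity) hle
      have hrp0 : r = ((r.toNat : Nat) : Int) := (Int.toNat_of_nonneg hr0).symm
      have hj0 : j ≤ r.toNat := by omega
      have hp0len : r.toNat < line.toList.length := by
        have h1 := hpref.length_le
        rw [List.length_drop] at h1
        have h2 : 0 < num.toList.length := List.length_pos_of_ne_nil hnum
        omega
      rw [findallLoop, if_neg hr]
      have harg : PySem.Str.findFrom line num (r + 1) none
          = PySem.Chars.findFrom line.toList num.toList ((r.toNat + 1 : Nat) : Int) none := by
        rw [PySem.Str.findFrom_eq]
        congr 1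
        push_cast
        omega
      rw [harg, ih (r.toNat + 1) (by omega) (by omega),
        occFrom_cons hj0 hp0len hpref hmin]
      simp only [List.map_cons]
      rw [← hrp0]

lemma findall_eq (num line : String) (hnum : num.toList ≠ []) (d : Int) :
    findall num d line = (occFrom num.toList line.toList 0).map (fun p : Nat => (d, (p : Int))) := by
  unfold findall
  rw [PySem.Str.find_eq, ← PySem.Chars.findFrom_zero]
  exact findallLoop_eq num line hnum d _ 0 (by omega) (by omega)

-- the dict A builds only ever touches the key "pos": characterize the whole fold
lemma foldl_appendPos (fa : List (Int × Int)) : ∀ v : List (Int × Int),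
    fa.foldl (fun a x => PySem.Dict.insert a "pos" (PySem.Dict.getD a "pos" [] ++ [x]))
        (PySem.Dict.mk [("pos", v)]) = PySem.Dict.mk [("pos", v ++ fa)] := by
  induction fa with
  | nil => intro v; simp
  | cons x rest ih =>
    intro v
    rw [List.foldl_cons,
      show PySem.Dict.insert (PySem.Dict.mk [("pos", v)]) "pos"
          (PySem.Dict.getD (PySem.Dict.mk [("pos", v)]) "pos" [] ++ [x])
        = PySem.Dict.mk [("pos", v ++ [x])] from rfl,
      ih (v ++ [x]), List.append_assoc, List.singleton_append]

lemma foldl_appendPos_empty (fa : List (Int × Int)) :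
    fa.foldl (fun a x => PySem.Dict.insert a "pos" (PySem.Dict.getD a "pos" [] ++ [x]))
        (PySem.Dict.empty : PySem.Dict String (List (Int × Int)))
      = if fa = [] then PySem.Dict.empty else PySem.Dict.mk [("pos", fa)] := by
  cases fa with
  | nil => rfl
  | cons x rest =>
    rw [if_neg (List.cons_ne_nil x rest), List.foldl_cons,
      show PySem.Dict.insert (PySem.Dict.empty : PySem.Dict String (List (Int × Int))) "pos"
          (PySem.Dict.getD (PySem.Dict.empty : PySem.Dict String (List (Int × Int))) "pos" [] ++ [x])
        = PySem.Dict.mk [("pos", [x])] from rfl,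
      foldl_appendPos rest [x], List.singleton_append]

lemma main_fold_pos (line : String) (ks : List (String × Int)) : ∀ v : List (Int × Int),
    ks.foldl (fun acc kv =>
      let find_all := findall kv.1 kv.2 line
      if find_all ≠ [] then
        find_all.foldl (fun a x => PySem.Dict.insert a "pos" (PySem.Dict.getD a "pos" [] ++ [x])) acc
      else acc) (PySem.Dict.mk [("pos", v)])
      = PySem.Dict.mk [("pos", v ++ ks.flatMap (fun kv => findall kv.1 kv.2 line))] := by
  induction ks with
  | nil => intro v; simp
  | cons k ks ih =>
    intro v
    rw [List.foldl_cons]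
    have hstep : (let find_all := findall k.1 k.2 line
        if find_all ≠ [] then
          find_all.foldl (fun a x => PySem.Dict.insert a "pos" (PySem.Dict.getD a "pos" [] ++ [x]))
            (PySem.Dict.mk [("pos", v)])
        else PySem.Dict.mk [("pos", v)])
        = PySem.Dict.mk [("pos", v ++ findall k.1 k.2 line)] := by
      by_cases hfa : findall k.1 k.2 line = []
      · simp [hfa]
      · simp only [hfa, ne_eq, not_false_eq_true, if_true]
        exact foldl_appendPos _ v
    rw [hstep, ih, List.flatMap_cons, List.append_assoc]

lemma main_fold (line : String) (ks : List (String × Int)) :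
    ks.foldl (fun acc kv =>
      let find_all := findall kv.1 kv.2 line
      if find_all ≠ [] then
        find_all.foldl (fun a x => PySem.Dict.insert a "pos" (PySem.Dict.getD a "pos" [] ++ [x])) acc
      else acc) (PySem.Dict.empty : PySem.Dict String (List (Int × Int)))
      = (if ks.flatMap (fun kv => findall kv.1 kv.2 line) = [] then PySem.Dict.empty
         else PySem.Dict.mk [("pos", ks.flatMap (fun kv => findall kv.1 kv.2 line))]) := by
  induction ks with
  | nil => rfl
  | cons k ks ih =>
    rw [List.foldl_cons]
    by_cases hfa : findall k.1 k.2 line = []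
    · have hstep : (let find_all := findall k.1 k.2 line
          if find_all ≠ [] then
            find_all.foldl (fun a x => PySem.Dict.insert a "pos" (PySem.Dict.getD a "pos" [] ++ [x]))
              (PySem.Dict.empty : PySem.Dict String (List (Int × Int)))
          else PySem.Dict.empty) = PySem.Dict.empty := by simp [hfa]
      rw [hstep, ih, List.flatMap_cons, hfa, List.nil_append]
    · have hstep : (let find_all := findall k.1 k.2 line
          if find_all ≠ [] then
            find_all.foldl (fun a x => PySem.Dict.insert a "pos" (PySem.Dict.getD a "pos" [] ++ [x]))
              (PySem.Dict.empty : PySem.Dict String (List (Int × Int)))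
          else PySem.Dict.empty) = PySem.Dict.mk [("pos", findall k.1 k.2 line)] := by
        simp only [hfa, ne_eq, not_false_eq_true, if_true]
        rw [foldl_appendPos_empty, if_neg hfa]
      rw [hstep, main_fold_pos, List.flatMap_cons,
        if_neg (by simp [hfa])]

-- generic list-shuffling helpers
lemma filterMap_cons_toList {α β : Type} (g : α → Option β) (x : α) (xs : List α) :
    (x :: xs).filterMap g = (g x).toList ++ xs.filterMap g := by
  cases h : g x <;> simp [h]

lemma filterMap_eq_flatMap_toList {α β : Type} (g : α → Option β) (ys : List α) :
    ys.filterMap g = ys.flatMap (fun y => (g y).toList) := by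
  induction ys with
  | nil => rfl
  | cons y ys ih => rw [filterMap_cons_toList, List.flatMap_cons, ih]

lemma flatMap_append_perm {β γ : Type} (ys : List β) (a b : β → List γ) :
    (ys.flatMap fun y => a y ++ b y).Perm (ys.flatMap a ++ ys.flatMap b) := by
  induction ys with
  | nil => simp
  | cons y ys ih =>
    simp only [List.flatMap_cons]
    refine (ih.append_left (a y ++ b y)).trans ?_
    simp only [List.append_assoc]
    refine List.Perm.append_left (a y) ?_
    rw [← List.append_assoc, ← List.append_assoc]
    exact List.perm_append_comm.append_right _

lemma map_filter_eq_filterMap {α β : Type} (p : α → Bool) (f : α → β) (l : List α) :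
    (l.filter p).map f = l.filterMap (fun x => if p x then some (f x) else none) := by
  induction l with
  | nil => rfl
  | cons x xs ih => cases h : p x <;> simp [h, ih]

-- exchange the two iteration orders, up to permutation
lemma flatMap_filterMap_comm {α β γ : Type} (xs : List α) (ys : List β) (f : α → β → Option γ) :
    (xs.flatMap fun x => ys.filterMap (f x)).Perm (ys.flatMap fun y => xs.filterMap (fun x => f x y)) := by
  induction xs with
  | nil => simp
  | cons x xs ih =>
    simp only [List.flatMap_cons]
    have h2 : (ys.flatMap fun y => (x :: xs).filterMap fun x' => f x' y)
        = ys.flatMap fun y => (f x y).toList ++ xs.filterMap (fun x' => f x' y) :=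
      List.flatMap_congr (fun y _ => filterMap_cons_toList _ x xs)
    rw [h2]
    refine List.Perm.trans ?_ (flatMap_append_perm ys (fun y => (f x y).toList)
      (fun y => xs.filterMap (fun x' => f x' y))).symm
    rw [← filterMap_eq_flatMap_toList]
    exact ih.append_left _

-- no TO_DIGIT pattern is a prefix of another, so at most one matches at a given index
lemma keys_no_prefix : TO_DIGIT.Pairwise (fun a b => ¬(a.1.toList <+: b.1.toList) ∧ ¬(b.1.toList <+: a.1.toList)) := by
  decide

lemma row_len_le_one (t : List Char) :
    ((TO_DIGIT.filter (fun kv => decide (kv.1.toList <+: t))).length ≤ 1) := by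
  have hpw : (TO_DIGIT.filter (fun kv => decide (kv.1.toList <+: t))).Pairwise
      (fun a b => ¬(a.1.toList <+: b.1.toList) ∧ ¬(b.1.toList <+: a.1.toList)) :=
    keys_no_prefix.filter _
  match hfl : TO_DIGIT.filter (fun kv => decide (kv.1.toList <+: t)) with
  | [] => rw [hfl]; simp
  | [a] => rw [hfl]; simp
  | a :: b :: rest =>
    exfalso
    rw [hfl] at hpw
    have hab := (List.pairwise_cons.mp hpw).1 b (by simp)
    have ha : a ∈ TO_DIGIT.filter (fun kv => decide (kv.1.toList <+: t)) := by
      rw [hfl]; exact List.mem_cons_self ..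
    have hb : b ∈ TO_DIGIT.filter (fun kv => decide (kv.1.toList <+: t)) := by
      rw [hfl]; exact List.mem_cons_of_mem _ (List.mem_cons_self ..)
    have hat := of_decide_eq_true (List.mem_filter.mp ha).2
    have hbt := of_decide_eq_true (List.mem_filter.mp hb).2
    rcases List.prefix_or_prefix_of_prefix hat hbt with h | h
    · exact hab.1 h
    · exact hab.2 h

-- B's inner row at position i, in two equivalent shapes
def rowPred (cs : List Char) (i : Nat) : (String × Int) → Bool := fun kv => decide (kv.1.toList <+: cs.drop i)
def rowFun (cs : List Char) (i : Nat) : (String × Int) → Option (Int × Int) :=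
  fun kv => if rowPred cs i kv then some (kv.2, (i : Int)) else none
def hitsOf (cs : List Char) : List (Int × Int) :=
  (List.range cs.length).flatMap (fun i => TO_DIGIT.filterMap (rowFun cs i))
def flatOf (line : String) : List (Int × Int) := TO_DIGIT.flatMap (fun kv => findall kv.1 kv.2 line)

lemma startswith_eq_decide (s t : List Char) : PySem.Chars.startswith s t = decide (t <+: s) := by
  by_cases h : t <+: s
  · simp [h, (PySem.Chars.startswith_iff s t).mpr h]
  · simp only [h, decide_false]
    by_contra hb
    exact h ((PySem.Chars.startswith_iff s t).mp (by revert hb; cases PySem.Chars.startswith s t <;> simp))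

lemma pos_nums_alt_eq (line : String) :
    pos_nums_alt line = if hitsOf line.toList = [] then [] else [("pos", hitsOf line.toList)] := by
  unfold pos_nums_alt hitsOf rowFun rowPred
  simp only [startswith_eq_decide]

lemma pos_nums_eq (line : String) :
    pos_nums line = (if flatOf line = [] then PySem.Dict.empty else PySem.Dict.mk [("pos", flatOf line)]).items.map
      (fun kv => (kv.1, PySem.List.sorted kv.2 (fun x => x.2) false)) := by
  unfold pos_nums
  rw [main_fold]
  rfl

lemma flat_perm_hits (line : String) : (flatOf line).Perm (hitsOf line.toList) := by
  have hne : ∀ kv ∈ TO_DIGIT, kv.1.toList ≠ [] := by decide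
  have hflat : flatOf line
      = TO_DIGIT.flatMap (fun kv => (List.range line.toList.length).filterMap (fun p => rowFun line.toList p kv)) := by
    apply List.flatMap_congr
    intro kv hkv
    rw [findall_eq kv.1 line (hne kv hkv) kv.2]
    unfold occFrom
    rw [Nat.sub_zero, ← List.range_eq_range']
    exact map_filter_eq_filterMap _ _ _
  rw [hflat]
  exact flatMap_filterMap_comm TO_DIGIT (List.range line.toList.length) (fun kv p => rowFun line.toList p kv)

lemma row_eq_map_filter (cs : List Char) (i : Nat) :
    TO_DIGIT.filterMap (rowFun cs i) = (TO_DIGIT.filter (rowPred cs i)).map (fun kv => (kv.2, (i : Int))) :=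
  (map_filter_eq_filterMap (rowPred cs i) (fun kv => (kv.2, (i : Int))) TO_DIGIT).symm

lemma pairwise_of_len_le_one {α : Type} {R : α → α → Prop} {l : List α} (h : l.length ≤ 1) : l.Pairwise R := by
  match l with
  | [] => exact List.Pairwise.nil
  | [a] => exact List.pairwise_singleton ..
  | a :: b :: rest => simp at h

lemma snd_of_mem_row {cs : List Char} {i : Nat} {a : Int × Int}
    (h : a ∈ TO_DIGIT.filterMap (rowFun cs i)) : a.2 = (i : Int) := by
  rw [row_eq_map_filter] at h
  obtain ⟨kv, _, rfl⟩ := List.mem_map.mp h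
  rfl

lemma hits_pairwise_aux (cs : List Char) :
    ∀ (n s : Nat), ((List.range' s n).flatMap (fun i => TO_DIGIT.filterMap (rowFun cs i))).Pairwise
      (fun a b : Int × Int => a.2 < b.2) := by
  intro n
  induction n with
  | zero => intro s; simp
  | succ n ih =>
    intro s
    rw [List.range'_succ, List.flatMap_cons, List.pairwise_append]
    refine ⟨pairwise_of_len_le_one (by rw [row_eq_map_filter, List.length_map]; exact row_len_le_one _), ih (s + 1), ?_⟩
    intro a ha b hb
    obtain ⟨i, hi, hbi⟩ := List.mem_flatMap.mp hb
    rw [snd_of_mem_row ha, snd_of_mem_row hbi]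
    have := (List.mem_range'_1.mp hi).1
    exact_mod_cast by omega

theorem pos_nums_spec_aux (line : String) : pos_nums line = pos_nums_alt line := by
  rw [pos_nums_eq, pos_nums_alt_eq]
  have hperm := flat_perm_hits line
  by_cases hnil : flatOf line = []
  · rw [hnil] at hperm
    rw [if_pos hnil, if_pos (List.nil_perm.mp hperm)]
    rfl
  · have hits_ne : hitsOf line.toList ≠ [] := fun h => hnil (List.perm_nil.mp (h ▸ hperm))
    rw [if_neg hnil, if_neg hits_ne]
    show [("pos", PySem.List.sorted (flatOf line) (fun x => x.2) false)] = [("pos", hitsOf line.toList)]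
    have hpw : (hitsOf line.toList).Pairwise (fun a b : Int × Int => a.2 < b.2) := by
      unfold hitsOf
      rw [List.range_eq_range']
      exact hits_pairwise_aux line.toList _ 0
    rw [PySem.List.sorted_eq_of_perm_of_pairwise_lt (flatOf line) (hitsOf line.toList) (fun x => x.2) hperm.symm hpw]

-- ===== VERDICT (by name: the statement is the Claim_ definition above) =====
theorem pos_nums_spec : Claim_equal_pos_nums := by
  intro line _
  show _ = _
  exact pos_nums_spec_aux line
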